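-- pv_equiv track=rewrite | github.com/othmanalikhan-apps/project_monies | monies/io.py | parse
-- ===== SOURCE A (Python) =====
-- def parse(data):
--     """
--     Parses the input of the Santander .txt file into CSV format.
--
--     The format of the bank statement is as follows:
--
--        "From: <date> to <date>"
--
--        "Account: <number>"
--
--        "Date: <date>"
--        "Description: <description>"
--        "Amount: <amount>"
--        "Balance: <amount>"
--
--         <second_transaction_entry>
--
--     :param data: A string of the text file data.
--     :return: A parsed string in CSV format.
--     """
--     sep = 5 * " "
--     csv = ""
--
--     data = list(filter(None, data))         # Removes empty lines
--     data = data[2:]                         # Skip headers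
--
--     # Removing field descriptions
--     for i, d in enumerate(data):
--         if d.startswith("Date"):
--             data[i] = d.replace("Date: ", "").strip()
--
--         if d.startswith("Description"):
--             data[i] = d.replace("Description: ", "").strip()
--
--         if d.startswith("Amount"):
--             data[i] = d.replace("Amount: ", "").replace(" GBP", "").strip()
--
--         if d.startswith("Balance"):
--             data[i] = d.replace("Balance: ", "").replace(" GBP", "").strip()
--
--     # Builds CSV string
--     for i, d in enumerate(data, start=1):
--         if i % 4 == 0:
--             csv = csv + d + "\n"
--         else:
--             csv = csv + d + sep
--
--     return csv
-- ===== SOURCE B (Python) =====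
-- RULES = [
--     ("Date", "Date: ", False),
--     ("Description", "Description: ", False),
--     ("Amount", "Amount: ", True),
--     ("Balance", "Balance: ", True),
-- ]
--
--
-- def _clean(d):
--     # first matching rule wins (at most one rule can match: no rule name is a
--     # prefix of another)
--     for prefix, label, gbp in RULES:
--         if d.startswith(prefix):
--             d = d.replace(label, "")
--             if gbp:
--                 d = d.replace(" GBP", "")
--             return d.strip()
--     return d
--
--
-- def parse(data):
--     sep = 5 * " "
--     fields = [_clean(d) for d in data if d][2:]
--     rows = []
--     while len(fields) >= 4:
--         rows.append(sep.join(fields[:4]) + "\n")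
--         fields = fields[4:]
--     for f in fields:
--         rows.append(f + sep)
--     return "".join(rows)
-- ===== Notes on version B (the rewrite author's own statement) =====
-- stated objective: alternative
-- what changed: B replaces A's two passes (an index-mutating field-stripping loop with four independent last-match-wins ifs, then an enumerate(start=1) loop keyed on i%4) by a table-driven first-match rule cleaner and a chunk-of-4 row builder that joins full rows and appends trailing fields.
import Mathlib
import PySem

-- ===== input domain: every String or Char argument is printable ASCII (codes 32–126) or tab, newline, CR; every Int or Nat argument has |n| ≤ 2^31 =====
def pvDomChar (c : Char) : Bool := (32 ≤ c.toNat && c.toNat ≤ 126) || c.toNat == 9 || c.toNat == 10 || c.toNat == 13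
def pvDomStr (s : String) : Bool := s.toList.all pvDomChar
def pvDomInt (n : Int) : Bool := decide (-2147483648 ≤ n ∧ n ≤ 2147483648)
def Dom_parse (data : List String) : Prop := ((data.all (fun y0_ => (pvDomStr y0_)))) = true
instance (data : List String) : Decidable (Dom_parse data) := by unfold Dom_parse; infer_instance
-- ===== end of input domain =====

-- B is a table-driven first-match cleaner plus a chunk-of-4 row builder; same value as A (alternative decomposition, no speed claim).

-- ===== PORT A =====
-- 'csv = csv + d + "\n" / + sep' loop, enumerate(data, start=1); kept on List Char (String.append is kernel-opaque)
def pvBuildA (i : Nat) (csv : List Char) : List String → List Char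
  | [] => csv
  | d :: rest =>
      pvBuildA (i + 1)
        (if i % 4 = 0 then csv ++ d.toList ++ ['\n'] else csv ++ d.toList ++ "     ".toList) rest

-- the body of A's first for-loop (each data[i] is recomputed from the original d, so the loop is a map)
def pvStripA (d : String) : String :=
  let r := d
  let r := if PySem.Str.startswith d "Date" then PySem.Str.strip (PySem.Str.replace d "Date: " "") else r
  let r := if PySem.Str.startswith d "Description" then PySem.Str.strip (PySem.Str.replace d "Description: " "") else r
  let r := if PySem.Str.startswith d "Amount" then PySem.Str.strip (PySem.Str.replace (PySem.Str.replace d "Amount: " "") " GBP" "") else r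
  let r := if PySem.Str.startswith d "Balance" then PySem.Str.strip (PySem.Str.replace (PySem.Str.replace d "Balance: " "") " GBP" "") else r
  r

def parse (data : List String) : String :=
  let data := data.filter (fun d => !d.toList.isEmpty)   -- filter(None, data)
  let data := PySem.List.slice data (some 2) none        -- data[2:]
  let data := data.map pvStripA
  String.ofList (pvBuildA 1 [] data)

-- ===== PORT B =====
def pvRules : List (String × String × Bool) :=
  [("Date", "Date: ", false), ("Description", "Description: ", false),
   ("Amount", "Amount: ", true), ("Balance", "Balance: ", true)]

def pvClean (rules : List (String × String × Bool)) (d : String) : String :=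
  match rules with
  | [] => d
  | (pre, label, gbp) :: rest =>
      if PySem.Str.startswith d pre then
        let s := PySem.Str.replace d label ""
        let s := if gbp then PySem.Str.replace s " GBP" "" else s
        PySem.Str.strip s
      else pvClean rest d

-- while len(fields) >= 4: emit sep.join(chunk)+'\n'; then trailing fields each followed by sep
def pvRowsB : List String → List Char
  | a :: b :: c :: d :: rest =>
      PySem.Chars.join "     ".toList [a.toList, b.toList, c.toList, d.toList] ++ ['\n'] ++ pvRowsB rest
  | chunk => chunk.flatMap (fun f => f.toList ++ "     ".toList)

def parse_alt (data : List String) : String :=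
  let fields := PySem.List.slice ((data.filter (fun d => !d.toList.isEmpty)).map (pvClean pvRules)) (some 2) none
  String.ofList (pvRowsB fields)

-- ===== PRECONDITION & SPEC =====
def Spec_parse (data : List String) (out : String) : Prop := out = parse_alt data
instance (data : List String) (out : String) : Decidable (Spec_parse data out) := by unfold Spec_parse; infer_instance

-- ===== CLAIM (what is proved, stated in full; the proofs are below) =====
def Claim_equal_parse : Prop := ∀ (data : List String), Dom_parse data → Spec_parse data (parse data)

-- ===== LEMMAS AND PROOFS =====

-- no two of A's four field prefixes can match the same line (none is a prefix of another)
theorem pv_excl (d : List Char) {p q : List Char} (hpq : ¬(p <+: q ∨ q <+: p))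
    (h1 : PySem.Chars.startswith d p = true) : PySem.Chars.startswith d q = false := by
  by_contra h
  have h2 : PySem.Chars.startswith d q = true := by
    cases hq : PySem.Chars.startswith d q with
    | true => rfl
    | false => exact absurd hq h
  have hp := (PySem.Chars.startswith_iff (s := d) (p := p)).mp h1
  have hq := (PySem.Chars.startswith_iff (s := d) (p := q)).mp h2
  rcases Nat.le_total p.length q.length with hle | hle
  · exact hpq (Or.inl (List.prefix_of_prefix_length_le hp hq hle))
  · exact hpq (Or.inr (List.prefix_of_prefix_length_le hq hp hle))

theorem pv_clean_eq_strip (d : String) : pvStripA d = pvClean pvRules d := by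
  unfold pvStripA pvClean pvRules
  simp only [PySem.Str.startswith_eq]
  by_cases h1 : PySem.Chars.startswith d.toList "Date".toList = true
  · have h2 := pv_excl (q := "Description".toList) d.toList (by decide) h1
    have h3 := pv_excl (q := "Amount".toList) d.toList (by decide) h1
    have h4 := pv_excl (q := "Balance".toList) d.toList (by decide) h1
    simp [pvClean] at h1 h2 h3 h4 ⊢
    simp [h1, h2, h3, h4]
  · by_cases h2 : PySem.Chars.startswith d.toList "Description".toList = true
    · have h3 := pv_excl (q := "Amount".toList) d.toList (by decide) h2
      have h4 := pv_excl (q := "Balance".toList) d.toList (by decide) h2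
      simp [pvClean] at h1 h2 h3 h4 ⊢
      simp [h1, h2, h3, h4]
    · by_cases h3 : PySem.Chars.startswith d.toList "Amount".toList = true
      · have h4 := pv_excl (q := "Balance".toList) d.toList (by decide) h3
        simp [pvClean] at h1 h2 h3 h4 ⊢
        simp [h1, h2, h3, h4]
      · by_cases h4 : PySem.Chars.startswith d.toList "Balance".toList = true
        · simp [pvClean] at h1 h2 h3 h4 ⊢
          simp [h1, h2, h3, h4]
        · simp [pvClean] at h1 h2 h3 h4 ⊢
          simp [h1, h2, h3, h4]

theorem pv_build_eq_rows (l : List String) : ∀ (i : Nat) (csv : List Char), i % 4 = 1 →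
    pvBuildA i csv l = csv ++ pvRowsB l := by
  induction l using pvRowsB.induct with
  | case1 a b c d rest ih =>
      intro i csv hi
      have e0 : i % 4 ≠ 0 := by omega
      have e1 : (i + 1) % 4 ≠ 0 := by omega
      have e2 : (i + 2) % 4 ≠ 0 := by omega
      have e3 : (i + 3) % 4 = 0 := by omega
      have e4 : (i + 4) % 4 = 1 := by omega
      simp only [pvBuildA, pvRowsB, if_neg e0, if_neg e1, if_neg e2, if_pos e3, ih _ _ e4,
        PySem.Chars.join_cons_cons, PySem.Chars.join_singleton]
      simp [List.append_assoc]
  | case2 chunk hne =>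
      intro i csv hi
      match chunk, hne with
      | [], _ => simp [pvBuildA, pvRowsB]
      | [a], _ =>
          have e0 : i % 4 ≠ 0 := by omega
          simp [pvBuildA, pvRowsB, if_neg e0]
      | [a, b], _ =>
          have e0 : i % 4 ≠ 0 := by omega
          have e1 : (i + 1) % 4 ≠ 0 := by omega
          simp [pvBuildA, pvRowsB, if_neg e0, if_neg e1, List.append_assoc]
      | [a, b, c], _ =>
          have e0 : i % 4 ≠ 0 := by omega
          have e1 : (i + 1) % 4 ≠ 0 := by omega
          have e2 : (i + 2) % 4 ≠ 0 := by omega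
          simp [pvBuildA, pvRowsB, if_neg e0, if_neg e1, if_neg e2, List.append_assoc]
      | a :: b :: c :: d :: rest, hne => exact absurd rfl (hne a b c d rest)

-- ===== VERDICT (by name: the statement is the Claim_ definition above) =====
theorem parse_spec : Claim_equal_parse := by
  intro data _
  unfold Spec_parse
  simp only [parse, parse_alt]
  have hs : PySem.List.slice ((data.filter (fun d => !d.toList.isEmpty)).map (pvClean pvRules)) (some 2) none
      = (PySem.List.slice (data.filter (fun d => !d.toList.isEmpty)) (some 2) none).map (pvClean pvRules) := by
    rw [show (2 : Int) = ((2 : Nat) : Int) from rfl, PySem.List.slice_from_natCast,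
      PySem.List.slice_from_natCast, List.map_drop]
  rw [hs, show List.map (pvClean pvRules) (PySem.List.slice (data.filter (fun d => !d.toList.isEmpty)) (some 2) none)
        = List.map pvStripA (PySem.List.slice (data.filter (fun d => !d.toList.isEmpty)) (some 2) none)
      from List.map_congr_left fun d _ => (pv_clean_eq_strip d).symm,
     pv_build_eq_rows _ 1 [] rfl, List.nil_append]
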